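-- pv_equiv track=rewrite | github.com/y-syo/advent-of-code-2024 | day04/part1.py | count_diagonal_right
-- ===== SOURCE A (Python) =====
-- target = "XMAS"
--
-- def count_diagonal_right(grid):
--     res = 0
--     for i in range(len(grid)):
--         res += (''.join([(grid[x + i][::-1])[x] for x in range(min(len(grid) - i, len(grid[0])))])).count(target)
--         res += (''.join([(grid[x + i][::-1])[x] for x in range(min(len(grid) - i, len(grid[0])))]))[::-1].count(target)
--     for i in range(1,len(grid[0])):
--         res += (''.join([(grid[x][::-1])[x + i] for x in range(min(len(grid), len(grid[0]) - i))])).count(target)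
--         res += (''.join([(grid[x][::-1])[x + i] for x in range(min(len(grid), len(grid[0]) - i))]))[::-1].count(target)
--     return (res)
-- ===== SOURCE B (Python) =====
-- target = "XMAS"
--
-- def count_diagonal_right(grid):
--     rows = len(grid)
--     cols = len(grid[0])
--
--     def scan(cell, n):
--         c = 0
--         for j in range(n - 3):
--             w = cell(j) + cell(j + 1) + cell(j + 2) + cell(j + 3)
--             if w == "XMAS" or w == "SAMX":
--                 c += 1
--         return c
--
--     total = 0
--     for i in range(rows):
--         total += scan(lambda x: grid[x + i][len(grid[x + i]) - 1 - x],
--                       min(rows - i, cols))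
--     for i in range(1, cols):
--         total += scan(lambda x: grid[x][len(grid[x]) - 1 - (x + i)],
--                       min(rows, cols - i))
--     return total
-- ===== Notes on version B (the rewrite author's own statement) =====
-- stated objective: faster
-- what changed: Replaces the join-into-a-string / str.count / reverse-and-count-again pattern with a direct sliding-window scan over each diagonal that reads the four cells at each position and counts windows equal to 'XMAS' or 'SAMX' in one pass, building no intermediate strings.
import Mathlib
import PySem

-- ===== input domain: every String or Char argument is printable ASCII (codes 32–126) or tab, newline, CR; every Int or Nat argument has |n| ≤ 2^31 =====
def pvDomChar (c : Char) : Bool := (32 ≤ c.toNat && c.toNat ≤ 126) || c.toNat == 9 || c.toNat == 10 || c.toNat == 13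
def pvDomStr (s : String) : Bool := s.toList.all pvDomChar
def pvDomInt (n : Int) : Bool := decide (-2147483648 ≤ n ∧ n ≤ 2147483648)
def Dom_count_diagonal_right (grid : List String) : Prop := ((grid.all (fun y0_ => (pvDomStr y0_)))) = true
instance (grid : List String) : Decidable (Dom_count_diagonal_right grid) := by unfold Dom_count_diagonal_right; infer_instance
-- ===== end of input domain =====

-- B replaces A's join-into-a-string / str.count / reverse-and-count-again pattern with a direct
-- sliding-window scan of each diagonal that counts windows equal to "XMAS" or "SAMX" in one pass.

-- ===== PORT A =====
def pvTarget : List Char := ['X', 'M', 'A', 'S']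

-- one element of A's comprehension: (grid[r][::-1])[k], a 1-char string ([] where Python raises)
def pvCellA (grid : List String) (r k : Int) : List Char :=
  match PySem.List.pyGet?
      ((PySem.List.slice? (PySem.List.pyGetD grid r "").toList none none (-1)).getD []) k with
  | some c => [c]
  | none => []

-- ''.join([(grid[ri x][::-1])[ci x] for x in range(n)])
def pvDiagA (grid : List String) (ri ci : Int → Int) (n : Int) : List Char :=
  PySem.Chars.join [] ((PySem.List.pyRange 0 n 1).map (fun x => pvCellA grid (ri x) (ci x)))

def count_diagonal_right (grid : List String) : Int :=
  let R : Int := PySem.List.len grid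
  let C : Int := PySem.Chars.len (PySem.List.pyGetD grid 0 "").toList
  let res := (PySem.List.pyRange 0 R 1).foldl (fun res i =>
    let s := pvDiagA grid (fun x => x + i) (fun x => x) (min (R - i) C)
    let res := res + (PySem.Chars.count s pvTarget : Int)
    res + (PySem.Chars.count ((PySem.List.slice? s none none (-1)).getD []) pvTarget : Int)) 0
  (PySem.List.pyRange 1 C 1).foldl (fun res i =>
    let s := pvDiagA grid (fun x => x) (fun x => x + i) (min R (C - i))
    let res := res + (PySem.Chars.count s pvTarget : Int)
    res + (PySem.Chars.count ((PySem.List.slice? s none none (-1)).getD []) pvTarget : Int)) res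

-- ===== PORT B =====
def pvTargetRev : List Char := ['S', 'A', 'M', 'X']

-- grid[r][len(grid[r]) - 1 - k]  (a possibly negative index wraps, as in Python; ' ' where Python raises)
def pvCellB (grid : List String) (r k : Int) : Char :=
  let row := (PySem.List.pyGetD grid r "").toList
  (PySem.List.pyGet? row ((row.length : Int) - 1 - k)).getD ' '

-- for j in range(n-3): if cell(j..j+3) == "XMAS" or == "SAMX": c += 1
def pvScan (cell : Int → Char) (n : Int) : Int :=
  (PySem.List.pyRange 0 (n - 3) 1).foldl (fun c j =>
    if [cell j, cell (j + 1), cell (j + 2), cell (j + 3)] = pvTarget ∨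
       [cell j, cell (j + 1), cell (j + 2), cell (j + 3)] = pvTargetRev
    then c + 1 else c) 0

def count_diagonal_right_alt (grid : List String) : Int :=
  let R : Int := PySem.List.len grid
  let C : Int := PySem.Chars.len (PySem.List.pyGetD grid 0 "").toList
  let total := (PySem.List.pyRange 0 R 1).foldl (fun total i =>
    total + pvScan (fun x => pvCellB grid (x + i) x) (min (R - i) C)) 0
  (PySem.List.pyRange 1 C 1).foldl (fun total i =>
    total + pvScan (fun x => pvCellB grid x (x + i)) (min R (C - i))) total

-- ===== PRECONDITION & SPEC =====
-- A raises exactly outside this (IndexError on (row[::-1])[x] for a row shorter than row 0,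
-- or on len(grid[0]) for an empty grid): the grid is nonempty and no row is shorter than row 0.
def Pre_count_diagonal_right (grid : List String) : Prop :=
  grid ≠ [] ∧ ∀ s ∈ grid, (grid.headD "").toList.length ≤ s.toList.length
instance (grid : List String) : Decidable (Pre_count_diagonal_right grid) := by
  unfold Pre_count_diagonal_right; infer_instance

def pvWitness_count_diagonal_right : List String := ["XMAS", "SAMX"]

def Spec_count_diagonal_right (grid : List String) (out : Int) : Prop := out = count_diagonal_right_alt grid
instance (grid : List String) (out : Int) : Decidable (Spec_count_diagonal_right grid out) := by unfold Spec_count_diagonal_right; infer_instance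

-- ===== CLAIM (what is proved, stated in full; the proofs are below) =====
def Claim_equal_count_diagonal_right : Prop := ∀ (grid : List String), Dom_count_diagonal_right grid → Pre_count_diagonal_right grid → Spec_count_diagonal_right grid (count_diagonal_right grid)

-- ===== LEMMAS AND PROOFS =====

-- number of positions where pat starts in s (windows of a single diagonal)
def pvW (pat : List Char) : List Char → Nat
  | [] => 0
  | c :: t => (if pat.isPrefixOf (c :: t) then 1 else 0) + pvW pat t

theorem pvW_cons (pat : List Char) (c : Char) (t : List Char) :
    pvW pat (c :: t) = (if pat <+: (c :: t) then 1 else 0) + pvW pat t := by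
  simp [pvW, List.isPrefixOf_iff_prefix]

theorem pv_pref_short {pat l : List Char} (h : l.length < pat.length) : ¬ (pat <+: l) :=
  fun hp => absurd hp.length_le (by omega)

theorem pv_suff_short {pat l : List Char} (h : l.length < pat.length) : ¬ (pat <:+ l) :=
  fun hp => absurd hp.length_le (by omega)

theorem pv_pref_iff_suff {pat l : List Char} (h : l.length = pat.length) :
    (pat <+: l) ↔ (pat <:+ l) := by
  constructor
  · intro h1; rw [h1.eq_of_length h.symm]
  · intro h1; rw [h1.eq_of_length h.symm]

theorem pvW_short (pat s : List Char) (h : s.length < pat.length) : pvW pat s = 0 := by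
  induction s with
  | nil => simp [pvW]
  | cons c t ih =>
    rw [pvW_cons, if_neg (pv_pref_short h), ih (by simp at h ⊢; omega)]

theorem pvW_countP (pat s : List Char) :
    pvW pat s = (List.range s.length).countP (fun j => pat.isPrefixOf (s.drop j)) := by
  induction s with
  | nil => simp [pvW]
  | cons c t ih =>
    simp only [pvW, List.length_cons, List.range_succ_eq_map, List.countP_cons, List.countP_map]
    simp only [List.drop_zero, ih]
    have : ((fun j => pat.isPrefixOf ((c :: t).drop j)) ∘ (fun k => k + 1))
        = fun j => pat.isPrefixOf (t.drop j) := by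
      funext j; simp
    rw [this]
    by_cases h : pat.isPrefixOf (c :: t) = true
    · simp [h]
      omega
    · simp [h]

theorem pvW_snoc (pat : List Char) (hp : pat.length = 4) (u : List Char) (c : Char) :
    pvW pat (u ++ [c]) = pvW pat u + (if pat <:+ (u ++ [c]) then 1 else 0) := by
  induction u with
  | nil =>
    have n1 : ¬(pat <+: [c]) := pv_pref_short (by simp [hp])
    have n2 : ¬(pat <:+ [c]) := pv_suff_short (by simp [hp])
    rw [List.nil_append, pvW_cons]
    simp only [pvW, if_neg n1, if_neg n2]
  | cons a u' ih =>
    simp only [List.cons_append, pvW_cons, ih]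
    by_cases hu : 3 ≤ u'.length
    · have e1 : (pat <+: a :: (u' ++ [c])) ↔ (pat <+: a :: u') := by
        rw [List.prefix_iff_eq_take, List.prefix_iff_eq_take, hp]
        have : (a :: (u' ++ [c])).take 4 = (a :: u').take 4 := by
          simp [List.take_append_of_le_length (by omega : 3 ≤ u'.length)]
        rw [this]
      have e2 : (pat <:+ a :: (u' ++ [c])) ↔ (pat <:+ u' ++ [c]) := by
        rw [List.suffix_cons_iff]
        constructor
        · rintro (h | h)
          · exfalso
            have := congrArg List.length h
            simp [hp] at this
            omega
          · exact h
        · exact fun h => Or.inr h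
      simp only [e1, e2]
      omega
    · have n1 : ¬(pat <:+ u' ++ [c]) := pv_suff_short (by simp [hp]; omega)
      have n2 : ¬(pat <+: a :: u') := pv_pref_short (by simp [hp]; omega)
      simp only [if_neg n1, if_neg n2]
      by_cases h2 : u'.length = 2
      · have e3 := pv_pref_iff_suff (pat := pat) (l := a :: (u' ++ [c])) (by simp [hp]; omega)
        by_cases hc : pat <:+ a :: (u' ++ [c])
        · simp [hc, e3.mpr hc]; omega
        · have n5 : ¬pat <+: a :: (u' ++ [c]) := fun h => hc (e3.mp h)
          simp [hc, n5]
      · have n3 : ¬(pat <+: a :: (u' ++ [c])) := pv_pref_short (by simp [hp]; omega)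
        have n4 : ¬(pat <:+ a :: (u' ++ [c])) := pv_suff_short (by simp [hp]; omega)
        simp only [if_neg n3, if_neg n4]
        omega

theorem pvW_rev (pat : List Char) (hp : pat.length = 4) (s : List Char) :
    pvW pat s.reverse = pvW pat.reverse s := by
  induction s with
  | nil => simp [pvW]
  | cons c t ih =>
    rw [List.reverse_cons, pvW_snoc pat hp, ih, pvW_cons]
    have e : (pat <:+ t.reverse ++ [c]) ↔ (pat.reverse <+: c :: t) := by
      have h1 : t.reverse ++ [c] = (c :: t).reverse := by simp
      rw [h1, ← List.reverse_reverse pat, List.reverse_suffix, List.reverse_reverse]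
    simp only [e]
    omega

-- A's str.count with the non-self-overlapping pattern "XMAS" counts exactly the matching windows
theorem pvGo_eq (fuel : Nat) (s : List Char) (acc : Nat) (h : s.length ≤ fuel) :
    PySem.Chars.count.go pvTarget fuel s acc = acc + pvW pvTarget s := by
  induction fuel using Nat.strong_induction_on generalizing s acc with
  | _ fuel ih =>
    match fuel, s with
    | 0, s =>
      have : s = [] := by cases s <;> simp_all
      subst this
      simp [PySem.Chars.count.go, pvW]
    | f+1, [] => simp [PySem.Chars.count.go, pvW]
    | f+1, c :: t =>
      rw [PySem.Chars.count.go]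
      by_cases hp : pvTarget.isPrefixOf (c :: t) = true
      · obtain ⟨t', ht⟩ := List.isPrefixOf_iff_prefix.mp hp
        have hct : c :: t = 'X' :: 'M' :: 'A' :: 'S' :: t' := by rw [← ht]; rfl
        have hlen : t'.length ≤ f := by
          have : (c :: t).length = t'.length + 4 := by rw [hct]; simp
          simp at this h; omega
        have hd : (List.drop pvTarget.length (c :: t)) = t' := by rw [hct]; rfl
        simp only [hp, if_pos]
        rw [hd, ih f (by omega) _ _ hlen, hct]
        simp [pvW, pvTarget, List.isPrefixOf]
        omega
      · simp only [hp, if_neg, Bool.false_eq_true, not_false_eq_true]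
        rw [ih f (by omega) _ _ (by simp at h; omega)]
        have : pvW pvTarget (c :: t) = pvW pvTarget t := by simp [pvW, hp]
        rw [this]

theorem pvCount_eq (s : List Char) : PySem.Chars.count s pvTarget = pvW pvTarget s := by
  rw [PySem.Chars.count]
  have : pvTarget.isEmpty = false := rfl
  rw [this]
  simp only [Bool.false_eq_true, if_false]
  simpa using pvGo_eq s.length s 0 (le_refl _)

theorem pv_countP_or {α : Type} (l : List α) (p q : α → Bool)
    (h : ∀ x ∈ l, ¬(p x = true ∧ q x = true)) :
    l.countP (fun x => p x || q x) = l.countP p + l.countP q := by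
  induction l with
  | nil => simp
  | cons a t ih =>
    simp only [List.countP_cons]
    rw [ih (fun x hx => h x (List.mem_cons_of_mem a hx))]
    have := h a (List.mem_cons_self)
    by_cases h1 : p a = true <;> by_cases h2 : q a = true <;> simp [h1, h2] at this ⊢ <;> omega

theorem pv_window (f : Nat → Char) (n j : Nat) (h : j + 4 ≤ n) :
    (((List.range n).map f).drop j).take 4 = [f j, f (j+1), f (j+2), f (j+3)] := by
  apply List.ext_getElem
  · simp; omega
  · intro i h1 h2
    simp only [List.getElem_take, List.getElem_drop, List.getElem_map, List.getElem_range]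
    simp at h2
    interval_cases i <;> simp

theorem pv_countP_pat (cell : Int → Char) (n : Nat) (hn : 4 ≤ n) (pat : List Char)
    (hp : pat.length = 4) :
    (List.range (n - 3)).countP
        (fun (k : Nat) => decide ([cell (k : Int), cell ((k : Int) + 1), cell ((k : Int) + 2), cell ((k : Int) + 3)] = pat))
      = pvW pat ((List.range n).map (fun (k : Nat) => cell (k : Int))) := by
  set L := (List.range n).map (fun (k : Nat) => cell (k : Int)) with hL
  have hlen : L.length = n := by simp [hL]
  have hsplit : n = (n - 3) + 3 := by omega
  have h2 : (List.countP (fun j => pat.isPrefixOf (L.drop j)) ((List.range 3).map ((n-3) + ·))) = 0 := by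
    rw [List.countP_eq_zero]
    intro j hj
    simp only [List.mem_map, List.mem_range] at hj
    obtain ⟨k, hk, rfl⟩ := hj
    simp only [List.isPrefixOf_iff_prefix]
    intro hpre
    have := hpre.length_le
    simp [hL, hp] at this
    omega
  have hsp : (List.range n).countP (fun j => pat.isPrefixOf (L.drop j))
      = (List.range (n - 3)).countP (fun j => pat.isPrefixOf (L.drop j)) := by
    conv_lhs => rw [hsplit, List.range_add]
    rw [List.countP_append, h2, Nat.add_zero]
  rw [pvW_countP, hlen, hsp]
  apply List.countP_congr
  intro j hj
  simp only [List.mem_range] at hj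
  have hwin := pv_window (fun (k : Nat) => cell (k : Int)) n j (by omega)
  rw [← hL] at hwin
  have e1 : (pat.isPrefixOf (L.drop j)) = decide ((L.drop j).take 4 = pat) := by
    rcases Bool.eq_false_or_eq_true (pat.isPrefixOf (L.drop j)) with h1 | h1 <;> rw [h1]
    · symm; rw [decide_eq_true_iff]
      rw [List.isPrefixOf_iff_prefix, List.prefix_iff_eq_take, hp] at h1
      exact h1.symm
    · symm; rw [decide_eq_false_iff_not]
      intro he
      rw [← Bool.not_eq_true, List.isPrefixOf_iff_prefix] at h1
      exact h1 (by rw [List.prefix_iff_eq_take, hp, he])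
  have e2 : [cell (j : Int), cell ((j : Int) + 1), cell ((j : Int) + 2), cell ((j : Int) + 3)]
      = [cell ((j : Nat) : Int), cell (((j+1 : Nat)) : Int), cell (((j+2 : Nat)) : Int), cell (((j+3 : Nat)) : Int)] := by
    push_cast; rfl
  rw [e1, hwin, e2]

theorem pvScan_eq (cell : Int → Char) (n : Nat) :
    pvScan cell (n : Int) =
      ((pvW pvTarget ((List.range n).map (fun (k : Nat) => cell (k : Int))) : Nat) : Int)
      + ((pvW pvTargetRev ((List.range n).map (fun (k : Nat) => cell (k : Int))) : Nat) : Int) := by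
  set L := (List.range n).map (fun (k : Nat) => cell (k : Int)) with hL
  have hlen : L.length = n := by simp [hL]
  by_cases hn : n ≤ 3
  · rw [pvScan, PySem.List.pyRange_one_eq_nil (by omega)]
    rw [pvW_short pvTarget L (by rw [hlen]; simp [pvTarget]; omega),
        pvW_short pvTargetRev L (by rw [hlen]; simp [pvTargetRev]; omega)]
    simp
  · rw [pvScan]
    have hcast : (n : Int) - 3 = ((n - 3 : Nat) : Int) := by omega
    rw [hcast, PySem.List.pyRange_one]
    have : ((n - 3 : Nat) : Int) - 0 = ((n - 3 : Nat) : Int) := by omega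
    rw [this, Int.toNat_natCast]
    simp only [zero_add]
    rw [List.foldl_map]
    rw [PySem.List.foldl_ite_add_one
      (p := fun k : Nat => [cell k, cell ((k:Int) + 1), cell ((k:Int) + 2), cell ((k:Int) + 3)] = pvTarget ∨
        [cell k, cell ((k:Int) + 1), cell ((k:Int) + 2), cell ((k:Int) + 3)] = pvTargetRev)]
    simp only [Bool.decide_or]
    rw [pv_countP_or _ _ _ (by
      intro k hk hcon
      simp only [decide_eq_true_iff] at hcon
      have : pvTarget = pvTargetRev := hcon.1.symm.trans hcon.2
      exact absurd this (by decide))]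
    rw [pv_countP_pat cell n (by omega) pvTarget (by decide),
        pv_countP_pat cell n (by omega) pvTargetRev (by decide)]
    push_cast
    ring

-- A's cell char, total form (used only where the access is in range)
def pvCharA (grid : List String) (r k : Int) : Char :=
  (PySem.List.pyGet?
    ((PySem.List.slice? (PySem.List.pyGetD grid r "").toList none none (-1)).getD []) k).getD ' '

theorem pv_cells (grid : List String) (r k : Int) (h0 : 0 ≤ k)
    (hk : k < ((PySem.List.pyGetD grid r "").toList.length : Int)) :
    pvCellA grid r k = [pvCharA grid r k] ∧ pvCellB grid r k = pvCharA grid r k := by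
  set row := (PySem.List.pyGetD grid r "").toList with hrow
  have hs : (PySem.List.slice? row none none (-1)).getD [] = row.reverse := by
    rw [PySem.List.slice?_none_none_neg_one]; rfl
  have hlt : k.toNat < row.length := by omega
  have hget : PySem.List.pyGet? row.reverse k = some (row[row.length - 1 - k.toNat]) := by
    rw [PySem.List.pyGet?_of_nonneg _ h0]
    rw [List.getElem?_eq_getElem (by simp; omega)]
    simp [List.getElem_reverse]
  constructor
  · rw [pvCellA, pvCharA, ← hrow, hs, hget]
    rfl
  · rw [pvCellB, pvCharA, ← hrow, hs, hget]
    show (PySem.List.pyGet? row ((row.length : Int) - 1 - k)).getD ' ' = _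
    have h1 : (row.length : Int) - 1 - k = ((row.length - 1 - k.toNat : Nat) : Int) := by omega
    rw [h1, PySem.List.pyGet?_natCast, List.getElem?_eq_getElem (by omega)]

theorem pv_diag (grid : List String) (ri ci : Int → Int) (nI : Int) (h0 : 0 ≤ nI)
    (hok : ∀ k : Nat, (k : Int) < nI →
      0 ≤ ci (k : Int) ∧ ci (k : Int) < ((PySem.List.pyGetD grid (ri (k : Int)) "").toList.length : Int)) :
    pvScan (fun x => pvCellB grid (ri x) (ci x)) nI
      = (PySem.Chars.count (pvDiagA grid ri ci nI) pvTarget : Int)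
        + (PySem.Chars.count ((PySem.List.slice? (pvDiagA grid ri ci nI) none none (-1)).getD []) pvTarget : Int) := by
  set n := nI.toNat with hn
  have hnI : (n : Int) = nI := by omega
  have hD : pvDiagA grid ri ci nI
      = (List.range n).map (fun (k : Nat) => pvCharA grid (ri (k : Int)) (ci (k : Int))) := by
    rw [pvDiagA, PySem.List.pyRange_one]
    have : ((nI - 0).toNat) = n := by omega
    rw [this]
    simp only [zero_add, List.map_map]
    have hmap : (List.range n).map ((fun x => pvCellA grid (ri x) (ci x)) ∘ (fun (k : Nat) => (k : Int)))
        = ((List.range n).map (fun (k : Nat) => pvCharA grid (ri (k : Int)) (ci (k : Int)))).map (fun c => [c]) := by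
      rw [List.map_map]
      apply List.map_congr_left
      intro k hk
      simp only [Function.comp_apply, List.mem_range] at *
      exact (pv_cells grid _ _ (hok k (by omega)).1 (hok k (by omega)).2).1
    rw [hmap]
    exact PySem.Chars.join_nil_singletons _
  have hB : ((List.range n).map (fun (k : Nat) => (fun x => pvCellB grid (ri x) (ci x)) (k : Int)))
      = (List.range n).map (fun (k : Nat) => pvCharA grid (ri (k : Int)) (ci (k : Int))) := by
    apply List.map_congr_left
    intro k hk
    simp only [List.mem_range] at hk
    exact (pv_cells grid _ _ (hok k (by omega)).1 (hok k (by omega)).2).2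
  rw [hD, ← hnI, pvScan_eq, hB]
  rw [PySem.List.slice?_none_none_neg_one]
  have : (some (((List.range n).map (fun (k : Nat) => pvCharA grid (ri (k : Int)) (ci (k : Int)))).reverse)).getD ([] : List Char)
      = ((List.range n).map (fun (k : Nat) => pvCharA grid (ri (k : Int)) (ci (k : Int)))).reverse := rfl
  rw [this, pvCount_eq, pvCount_eq, pvW_rev pvTarget (by decide)]
  have : pvTarget.reverse = pvTargetRev := by decide
  rw [this]

-- ===== VERDICT (by name: the statement is the Claim_ definition above) =====
theorem count_diagonal_right_spec : Claim_equal_count_diagonal_right := by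
  intro grid _ hpre
  obtain ⟨hne, hlen⟩ := hpre
  unfold Spec_count_diagonal_right
  rw [count_diagonal_right, count_diagonal_right_alt]
  set R : Int := PySem.List.len grid with hR
  set C : Int := PySem.Chars.len (PySem.List.pyGetD grid 0 "").toList with hC
  have hRlen : R = (grid.length : Int) := by simp [hR]
  have hClen : C = ((grid.headD "").toList.length : Int) := by
    cases grid with
    | nil => exact absurd rfl hne
    | cons g t => simp [hC, PySem.List.pyGetD_zero_cons]
  have hrowlen : ∀ r : Int, 0 ≤ r → r < R →
      C ≤ ((PySem.List.pyGetD grid r "").toList.length : Int) := by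
    intro r hr0 hrR
    have h1 : r.toNat < grid.length := by omega
    rw [PySem.List.pyGetD_eq_getElem _ _ hr0 (by omega)]
    have := hlen (grid[r.toNat]) (List.getElem_mem h1)
    omega
  have hloop1 : ∀ (acc : Int) (i : Int), i ∈ PySem.List.pyRange 0 R 1 →
      (acc + (PySem.Chars.count (pvDiagA grid (fun x => x + i) (fun x => x) (min (R - i) C)) pvTarget : Int)
        + (PySem.Chars.count ((PySem.List.slice? (pvDiagA grid (fun x => x + i) (fun x => x) (min (R - i) C)) none none (-1)).getD []) pvTarget : Int))
      = acc + pvScan (fun x => pvCellB grid (x + i) x) (min (R - i) C) := by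
    intro acc i hi
    rw [PySem.List.mem_pyRange_one] at hi
    have hd := pv_diag grid (fun x => x + i) (fun x => x) (min (R - i) C)
      (by omega)
      (by
        intro k hk
        beta_reduce
        refine ⟨by omega, ?_⟩
        have h1 : (k : Int) < C := by omega
        have h2 := hrowlen ((k : Int) + i) (by omega) (by omega)
        omega)
    beta_reduce at hd
    rw [hd]
    ring
  have hloop2 : ∀ (acc : Int) (i : Int), i ∈ PySem.List.pyRange 1 C 1 →
      (acc + (PySem.Chars.count (pvDiagA grid (fun x => x) (fun x => x + i) (min R (C - i))) pvTarget : Int)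
        + (PySem.Chars.count ((PySem.List.slice? (pvDiagA grid (fun x => x) (fun x => x + i) (min R (C - i))) none none (-1)).getD []) pvTarget : Int))
      = acc + pvScan (fun x => pvCellB grid x (x + i)) (min R (C - i)) := by
    intro acc i hi
    rw [PySem.List.mem_pyRange_one] at hi
    have hd := pv_diag grid (fun x => x) (fun x => x + i) (min R (C - i))
      (by omega)
      (by
        intro k hk
        beta_reduce
        refine ⟨by omega, ?_⟩
        have h1 : (k : Int) + i < C := by omega
        have h2 := hrowlen (k : Int) (by omega) (by omega)
        omega)
    beta_reduce at hd
    rw [hd]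
    ring
  have e1 := PySem.List.foldl_congr_mem _ _ _ (0 : Int) hloop1
  rw [e1]
  exact PySem.List.foldl_congr_mem _ _ _ _ hloop2
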